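-- pv_equiv track=rewrite | github.com/paiml/depyler | examples/hard_statistical_functions.py | int_variance
-- ===== SOURCE A (Python) =====
-- def int_mean(nums: list[int]) -> int:
--     """Compute the integer mean (truncated) of a list."""
--     if len(nums) == 0:
--         return 0
--     total: int = 0
--     i: int = 0
--     while i < len(nums):
--         total = total + nums[i]
--         i = i + 1
--     return total // len(nums)
--
-- def int_variance(nums: list[int]) -> int:
--     """Compute the integer variance (truncated) of a list."""
--     if len(nums) == 0:
--         return 0
--     avg: int = int_mean(nums)
--     total: int = 0
--     i: int = 0
--     while i < len(nums):
--         diff: int = nums[i] - avg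
--         total = total + diff * diff
--         i = i + 1
--     return total // len(nums)
-- ===== SOURCE B (Python) =====
-- def int_variance(nums: list[int]) -> int:
--     """Compute the integer variance (truncated) of a list."""
--     if len(nums) == 0:
--         return 0
--     s = 0
--     sq = 0
--     for x in nums:
--         s += x
--         sq += x * x
--     n = len(nums)
--     avg = s // n
--     total = sq - 2 * avg * s + n * avg * avg
--     return total // n
-- ===== Notes on version B (the rewrite author's own statement) =====
-- stated objective: faster
-- what changed: Single accumulation pass over the list collecting sum and sum of squares, then a closed-form algebraic expansion sum_sq - 2*avg*sum + n*avg^2 replaces A's second pass over squared deviations (A also calls a separate mean helper, making two passes with per-element subtraction).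
import Mathlib
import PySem

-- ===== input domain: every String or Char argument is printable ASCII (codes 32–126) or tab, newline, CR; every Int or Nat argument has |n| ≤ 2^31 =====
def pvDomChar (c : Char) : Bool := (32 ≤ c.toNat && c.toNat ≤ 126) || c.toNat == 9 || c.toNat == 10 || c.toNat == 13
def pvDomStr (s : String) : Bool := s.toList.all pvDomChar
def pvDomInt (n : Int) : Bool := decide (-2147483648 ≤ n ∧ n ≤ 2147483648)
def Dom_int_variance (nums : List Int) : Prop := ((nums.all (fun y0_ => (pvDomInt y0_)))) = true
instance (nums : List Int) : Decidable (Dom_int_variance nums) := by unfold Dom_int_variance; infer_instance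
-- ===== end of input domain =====

-- B replaces A's two passes (mean, then squared deviations) by one accumulation pass
-- plus the exact algebraic expansion sum_sq - 2*avg*sum + n*avg^2; same return value.

-- ===== PORT A =====
def int_mean (nums : List Int) : Int :=
  if nums.length = 0 then 0
  else
    -- 'while i < len(nums): total += nums[i]' visits the elements in order
    let total := nums.foldl (fun total x => total + x) 0
    PySem.Int.floordiv total nums.length

def int_variance (nums : List Int) : Int :=
  if nums.length = 0 then 0
  else
    let avg := int_mean nums
    let total := nums.foldl (fun total x => total + (x - avg) * (x - avg)) 0
    PySem.Int.floordiv total nums.length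

-- ===== PORT B =====
def int_variance_alt (nums : List Int) : Int :=
  if nums.length = 0 then 0
  else
    let p := nums.foldl (fun (p : Int × Int) x => (p.1 + x, p.2 + x * x)) (0, 0)
    let n : Int := nums.length
    let avg := PySem.Int.floordiv p.1 n
    let total := p.2 - 2 * avg * p.1 + n * avg * avg
    PySem.Int.floordiv total n

-- ===== PRECONDITION & SPEC =====
def Spec_int_variance (nums : List Int) (out : Int) : Prop := out = int_variance_alt nums
instance (nums : List Int) (out : Int) : Decidable (Spec_int_variance nums out) := by unfold Spec_int_variance; infer_instance

-- ===== CLAIM (what is proved, stated in full; the proofs are below) =====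
def Claim_equal_int_variance : Prop := ∀ (nums : List Int), Dom_int_variance nums → Spec_int_variance nums (int_variance nums)

-- ===== LEMMAS AND PROOFS =====

-- Shifting the accumulator out of a 'foldl (+ f x)' loop.
lemma shift_foldl (ys : List Int) (f : Int → Int) (c : Int) :
    ys.foldl (fun t x => t + f x) c = c + ys.foldl (fun t x => t + f x) 0 := by
  induction ys generalizing c with
  | nil => simp
  | cons y ys ih =>
      simp only [List.foldl_cons]
      rw [ih, ih (0 + f y)]; ring

-- B's pair fold computes (sum, sum of squares).
lemma pair_foldl (nums : List Int) (a b : Int) :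
    nums.foldl (fun (p : Int × Int) x => (p.1 + x, p.2 + x * x)) (a, b)
      = (a + nums.foldl (fun t x => t + x) 0,
         b + nums.foldl (fun t x => t + x * x) 0) := by
  induction nums generalizing a b with
  | nil => simp
  | cons y ys ih =>
      simp only [List.foldl_cons]
      rw [ih, shift_foldl ys (fun x => x) (0 + y), shift_foldl ys (fun x => x * x) (0 + y * y)]
      simp [Prod.ext_iff]; constructor <;> ring

-- The squared-deviation sum expands algebraically.
lemma sq_dev_expand (nums : List Int) (avg : Int) :
    nums.foldl (fun t x => t + (x - avg) * (x - avg)) 0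
      = nums.foldl (fun t x => t + x * x) 0
        - 2 * avg * nums.foldl (fun t x => t + x) 0
        + (nums.length : Int) * avg * avg := by
  induction nums with
  | nil => simp
  | cons y ys ih =>
      simp only [List.foldl_cons, List.length_cons]
      rw [shift_foldl ys (fun x => (x - avg) * (x - avg)) _, ih,
          shift_foldl ys (fun x => x) (0 + y), shift_foldl ys (fun x => x * x) (0 + y * y)]
      push_cast; ring

-- ===== VERDICT (by name: the statement is the Claim_ definition above) =====
theorem int_variance_spec : Claim_equal_int_variance := by
  intro nums _
  unfold Spec_int_variance int_variance int_variance_alt int_mean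
  by_cases h : nums.length = 0
  · simp [h]
  · simp only [h, if_false]
    rw [pair_foldl, sq_dev_expand]
    simp
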